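-- pv_equiv track=rewrite | github.com/cybertronai/ByteDMD-definition | experiments/grid/algorithms.py | spatial_conv2d
-- ===== SOURCE A (Python) =====
-- def spatial_conv2d(image, kernel):
--     """Same-size 2D convolution with zero padding."""
--
--     rows = len(image)
--     cols = len(image[0])
--     k_rows = len(kernel)
--     k_cols = len(kernel[0])
--     center_r = k_rows // 2
--     center_c = k_cols // 2
--
--     out = [[None] * cols for _ in range(rows)]
--     for i in range(rows):
--         for j in range(cols):
--             total = None
--             for u in range(k_rows):
--                 ii = i + center_r - u
--                 if ii < 0 or ii >= rows:
--                     continue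
--                 for v in range(k_cols):
--                     jj = j + center_c - v
--                     if jj < 0 or jj >= cols:
--                         continue
--                     product = image[ii][jj] * kernel[u][v]
--                     total = product if total is None else total + product
--             out[i][j] = total
--     return out
-- ===== SOURCE B (Python) =====
-- def spatial_conv2d(image, kernel):
--     """Same-size 2D convolution via an explicitly zero-padded image (no bounds checks)."""
--     rows = len(image)
--     cols = len(image[0])
--     k_rows = len(kernel)
--     k_cols = len(kernel[0])
--     center_r = k_rows // 2
--     center_c = k_cols // 2
--     top = k_rows - 1 - center_r
--     left = k_cols - 1 - center_c
--     zero_row = [0] * (cols + k_cols - 1)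
--     pad = ([list(zero_row) for _ in range(top)]
--            + [[0] * left + list(row[:cols]) + [0] * center_c for row in image]
--            + [list(zero_row) for _ in range(center_r)])
--     return [[sum(pad[i + k_rows - 1 - u][j + k_cols - 1 - v] * kernel[u][v]
--                  for u in range(k_rows) for v in range(k_cols))
--              for j in range(cols)]
--             for i in range(rows)]
-- ===== Notes on version B (the rewrite author's own statement) =====
-- stated objective: simpler
-- what changed: B builds an explicitly zero-padded copy of the image once and then sums every kernel tap with plain unguarded indexing and a 0-initialised accumulator, instead of A's per-tap bounds checks with a None sentinel threaded through the loop.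
-- outside the precondition, e.g. on spatial_conv2d([[1]], [[]]): A returns [[None]], B returns [[0]]; on spatial_conv2d([[1]], [[1, 2], [3, 4], [5]]): A returns [[4]], B raises IndexError
import Mathlib
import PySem

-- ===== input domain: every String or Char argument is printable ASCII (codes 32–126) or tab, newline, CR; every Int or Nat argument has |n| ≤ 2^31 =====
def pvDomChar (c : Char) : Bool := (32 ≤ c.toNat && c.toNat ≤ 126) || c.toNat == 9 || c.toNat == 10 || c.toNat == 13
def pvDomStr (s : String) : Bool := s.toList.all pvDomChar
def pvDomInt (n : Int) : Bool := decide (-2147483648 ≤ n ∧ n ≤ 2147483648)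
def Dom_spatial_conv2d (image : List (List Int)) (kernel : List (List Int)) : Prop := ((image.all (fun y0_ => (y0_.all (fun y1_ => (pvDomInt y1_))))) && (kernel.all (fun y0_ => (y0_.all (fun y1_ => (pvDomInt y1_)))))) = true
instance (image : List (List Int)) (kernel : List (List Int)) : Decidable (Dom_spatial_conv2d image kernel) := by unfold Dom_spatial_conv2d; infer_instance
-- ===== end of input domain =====

-- B replaces A's per-tap bounds checks and None sentinel by a zero-padded copy of the image
-- with unguarded indexing and a 0-initialised accumulator (simpler; same asymptotic cost).


-- ===== PORT A =====
def spatial_conv2d (image : List (List Int)) (kernel : List (List Int)) : List (List (Option Int)) :=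
  let rows := image.length
  let cols := (image.headD []).length
  let k_rows := kernel.length
  let k_cols := (kernel.headD []).length
  let center_r := k_rows / 2
  let center_c := k_cols / 2
  (List.range rows).map (fun (i : Nat) =>
    (List.range cols).map (fun (j : Nat) =>
      (List.range k_rows).foldl (fun total (u : Nat) =>
        let ii : Int := (i : Int) + (center_r : Int) - (u : Int)
        if ii < 0 ∨ (rows : Int) ≤ ii then total
        else (List.range k_cols).foldl (fun total (v : Nat) =>
          let jj : Int := (j : Int) + (center_c : Int) - (v : Int)
          if jj < 0 ∨ (cols : Int) ≤ jj then total
          else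
            let product := (image.getD ii.toNat []).getD jj.toNat 0 * (kernel.getD u []).getD v 0
            match total with
            | none => some product
            | some t => some (t + product)) total) none))

-- ===== PORT B =====
def spatial_conv2d_alt (image : List (List Int)) (kernel : List (List Int)) : List (List (Option Int)) :=
  let rows := image.length
  let cols := (image.headD []).length
  let k_rows := kernel.length
  let k_cols := (kernel.headD []).length
  let center_r := k_rows / 2
  let center_c := k_cols / 2
  let top := k_rows - 1 - center_r
  let left := k_cols - 1 - center_c
  let pad : List (List Int) :=
    List.replicate top (List.replicate (cols + k_cols - 1) 0)
      ++ image.map (fun row => List.replicate left 0 ++ List.take cols row ++ List.replicate center_c 0)  -- row[:cols], exact: cols ≥ 0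
      ++ List.replicate center_r (List.replicate (cols + k_cols - 1) 0)
  (List.range rows).map (fun i =>
    (List.range cols).map (fun j =>
      some ((List.range k_rows).foldl (fun s u =>
        (List.range k_cols).foldl (fun s v =>
          s + (pad.getD (i + k_rows - 1 - u) []).getD (j + k_cols - 1 - v) 0
                * (kernel.getD u []).getD v 0) s) 0)))

-- ===== PRECONDITION & SPEC =====
-- Pre_ = the natural domain: nonempty image and kernel, every row at least as long as the
-- first one (A raises IndexError on shorter accessed rows), and a kernel with at least one
-- column.  It excludes inputs where A still returns only when the value is an accident of A:
-- a zero-column kernel (A's None sentinel escapes) or a too-short kernel row that A's bounds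
-- checks happen never to visit (B indexes every kernel row and raises there).
def Pre_spatial_conv2d (image : List (List Int)) (kernel : List (List Int)) : Prop :=
  image ≠ [] ∧ kernel ≠ [] ∧
  (∀ r ∈ image, (image.headD []).length ≤ r.length) ∧
  (∀ r ∈ kernel, (kernel.headD []).length ≤ r.length) ∧
  ((image.headD []).length = 0 ∨ (kernel.headD []) ≠ [])

instance (image : List (List Int)) (kernel : List (List Int)) : Decidable (Pre_spatial_conv2d image kernel) := by
  unfold Pre_spatial_conv2d; infer_instance

def pvWitness_spatial_conv2d : List (List Int) × List (List Int) :=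
  ([[1, 2], [3, 4]], [[0, 1], [1, 0]])

def Spec_spatial_conv2d (image : List (List Int)) (kernel : List (List Int)) (out : List (List (Option Int))) : Prop := out = spatial_conv2d_alt image kernel
instance (image : List (List Int)) (kernel : List (List Int)) (out : List (List (Option Int))) : Decidable (Spec_spatial_conv2d image kernel out) := by unfold Spec_spatial_conv2d; infer_instance

-- ===== CLAIM (what is proved, stated in full; the proofs are below) =====
def Claim_equal_spatial_conv2d : Prop := ∀ (image : List (List Int)) (kernel : List (List Int)), Dom_spatial_conv2d image kernel → Pre_spatial_conv2d image kernel → Spec_spatial_conv2d image kernel (spatial_conv2d image kernel)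

-- ===== LEMMAS AND PROOFS =====

-- A's Option accumulator, started on `some t`, is a plain Int fold.
lemma foldl_opt_some (P : ℕ → Prop) [DecidablePred P] (p : ℕ → ℤ) (l : List ℕ) (t : ℤ) :
    l.foldl (fun a v => if P v then a else
        match a with | none => some (p v) | some s => some (s + p v)) (some t)
    = some (l.foldl (fun s v => if P v then s else s + p v) t) := by
  induction l generalizing t with
  | nil => rfl
  | cons v vs ih => by_cases h : P v <;> simp [h, ih]

lemma foldl_int_skip (P : ℕ → Prop) [DecidablePred P] (p : ℕ → ℤ) (l : List ℕ) (t : ℤ)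
    (h : ∀ v ∈ l, P v) :
    l.foldl (fun s v => if P v then s else s + p v) t = t := by
  induction l generalizing t with
  | nil => rfl
  | cons v vs ih =>
    simp only [List.forall_mem_cons] at h
    simp [h.1, ih _ h.2]

-- A's Option accumulator, started on `none`.
lemma foldl_opt_none (P : ℕ → Prop) [DecidablePred P] (p : ℕ → ℤ) (l : List ℕ) :
    l.foldl (fun a v => if P v then a else
        match a with | none => some (p v) | some s => some (s + p v)) none
    = if (∀ v ∈ l, P v) then none else some (l.foldl (fun s v => if P v then s else s + p v) 0) := by
  induction l with
  | nil => simp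
  | cons v vs ih =>
    by_cases h : P v
    · simp [h, ih]
    · simp [h, foldl_opt_some]

-- the two-level version used for A's (u,v) loops
lemma foldl_opt_outer_some (Q : ℕ → Prop) [DecidablePred Q] (P : ℕ → ℕ → Prop)
    [∀ u, DecidablePred (P u)] (p : ℕ → ℕ → ℤ) (m : ℕ) (l : List ℕ) (t : ℤ) :
    l.foldl (fun a u => if Q u then a else
        (List.range m).foldl (fun a v => if P u v then a else
          match a with | none => some (p u v) | some s => some (s + p u v)) a) (some t)
    = some (l.foldl (fun s u => if Q u then s else
        (List.range m).foldl (fun s v => if P u v then s else s + p u v) s) t) := by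
  induction l generalizing t with
  | nil => rfl
  | cons u us ih => by_cases h : Q u <;> simp [h, ih, foldl_opt_some]

lemma foldl_opt_outer_none (Q : ℕ → Prop) [DecidablePred Q] (P : ℕ → ℕ → Prop)
    [∀ u, DecidablePred (P u)] (p : ℕ → ℕ → ℤ) (m : ℕ) (l : List ℕ) :
    l.foldl (fun a u => if Q u then a else
        (List.range m).foldl (fun a v => if P u v then a else
          match a with | none => some (p u v) | some s => some (s + p u v)) a) none
    = if (∀ u ∈ l, Q u ∨ ∀ v < m, P u v) then none
      else some (l.foldl (fun s u => if Q u then s else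
        (List.range m).foldl (fun s v => if P u v then s else s + p u v) s) 0) := by
  induction l with
  | nil => simp
  | cons u us ih =>
    simp only [List.foldl_cons, List.forall_mem_cons]
    by_cases hq : Q u
    · rw [if_pos hq, if_pos hq, ih]
      by_cases hrest : ∀ x ∈ us, Q x ∨ ∀ v < m, P x v
      · rw [if_pos hrest, if_pos ⟨Or.inl hq, hrest⟩]
      · rw [if_neg hrest, if_neg (by tauto)]
    · rw [if_neg hq, if_neg hq]
      by_cases hp : ∀ v < m, P u v
      · rw [foldl_opt_none, if_pos (by simpa [List.mem_range] using hp), ih,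
          foldl_int_skip (fun v => P u v) (fun v => p u v) (List.range m) 0
            (by simpa [List.mem_range] using hp)]
        by_cases hrest : ∀ x ∈ us, Q x ∨ ∀ v < m, P x v
        · rw [if_pos hrest, if_pos ⟨Or.inr hp, hrest⟩]
        · rw [if_neg hrest, if_neg (by tauto)]
      · rw [foldl_opt_none, if_neg (by simpa [List.mem_range] using hp),
          foldl_opt_outer_some, if_neg (by tauto)]

-- padded row lookup
lemma padRow_getD (left cc : ℕ) (row : List ℤ) (C : ℕ) :
    (List.replicate left 0 ++ row ++ List.replicate cc 0).getD C 0 =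
      if left ≤ C ∧ C - left < row.length then row.getD (C - left) 0 else 0 := by
  simp only [List.append_assoc, List.getD_eq_getElem?_getD]
  rcases lt_or_ge C left with h | h
  · rw [List.getElem?_append_left (by simpa using h), List.getElem?_replicate,
      if_pos h, if_neg (by omega)]
    rfl
  · rw [List.getElem?_append_right (by simpa using h)]
    simp only [List.length_replicate]
    rcases lt_or_ge (C - left) row.length with h2 | h2
    · rw [List.getElem?_append_left h2, if_pos ⟨h, h2⟩]
    · rw [List.getElem?_append_right h2, List.getElem?_replicate,
        if_neg (show ¬ (left ≤ C ∧ C - left < row.length) by omega)]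
      split <;> rfl

-- padded matrix lookup (row level)
lemma pad_getD (top cr w : ℕ) (mid : List (List ℤ)) (R C : ℕ) :
    ((List.replicate top (List.replicate w (0 : ℤ)) ++ mid
        ++ List.replicate cr (List.replicate w 0)).getD R []).getD C 0 =
      if top ≤ R ∧ R - top < mid.length then (mid.getD (R - top) []).getD C 0 else 0 := by
  simp only [List.append_assoc, List.getD_eq_getElem?_getD]
  rcases lt_or_ge R top with h | h
  · rw [List.getElem?_append_left (by simpa using h), List.getElem?_replicate,
      if_pos h, if_neg (by omega)]
    show (List.replicate w (0 : ℤ))[C]?.getD 0 = 0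
    rw [List.getElem?_replicate]
    split <;> rfl
  · rw [List.getElem?_append_right (by simpa using h)]
    simp only [List.length_replicate]
    rcases lt_or_ge (R - top) mid.length with h2 | h2
    · rw [List.getElem?_append_left h2, if_pos ⟨h, h2⟩]
    · rw [List.getElem?_append_right h2, List.getElem?_replicate,
        if_neg (show ¬ (top ≤ R ∧ R - top < mid.length) by omega)]
      split
      · show (List.replicate w (0 : ℤ))[C]?.getD 0 = 0
        rw [List.getElem?_replicate]
        split <;> rfl
      · rfl

lemma foldl_ext' {α β : Type} (f g : α → β → α) (a : α) (l : List β)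
    (H : ∀ a b, b ∈ l → f a b = g a b) : l.foldl f a = l.foldl g a := by
  induction l generalizing a with
  | nil => rfl
  | cons x xs ih =>
    simp only [List.foldl_cons]
    rw [H _ _ (by simp)]
    exact ih _ (fun a b hb => H a b (by simp [hb]))

lemma foldl_self {β : Type} (l : List β) (s : ℤ) :
    l.foldl (fun s _ => s) s = s := by
  induction l generalizing s with
  | nil => rfl
  | cons x xs ih => simp [ih s]

lemma getD_map_row (f : List ℤ → List ℤ) (l : List (List ℤ)) (n : ℕ) (h : n < l.length) :
    (l.map f).getD n [] = f (l.getD n []) := by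
  rw [List.getD_eq_getElem?_getD, List.getElem?_map, List.getElem?_eq_getElem h,
    List.getD_eq_getElem?_getD, List.getElem?_eq_getElem h]
  rfl

-- ===== VERDICT (by name: the statement is the Claim_ definition above) =====
theorem spatial_conv2d_spec : Claim_equal_spatial_conv2d := by
  intro image kernel _hdom hpre
  obtain ⟨him, hker, hrect, hkrect, hk0⟩ := hpre
  have hkr : 0 < kernel.length := List.length_pos_iff.mpr hker
  unfold Spec_spatial_conv2d spatial_conv2d spatial_conv2d_alt
  dsimp only
  apply List.map_congr_left
  intro i hi
  rw [List.mem_range] at hi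
  apply List.map_congr_left
  intro j hj
  rw [List.mem_range] at hj
  have hkc : 0 < (kernel.headD []).length := by
    rcases hk0 with h0 | h0
    · omega
    · exact List.length_pos_iff.mpr h0
  rw [foldl_opt_outer_none]
  split_ifs with hall
  · exfalso
    have h1 := hall (kernel.length / 2) (List.mem_range.mpr (by omega))
    rcases h1 with h1 | h1
    · omega
    · have h2 := h1 ((kernel.headD []).length / 2) (by omega)
      omega
  · congr 1
    apply foldl_ext'
    intro s u hu
    rw [List.mem_range] at hu
    by_cases hq : ((i : ℤ) + ↑(kernel.length / 2) - ↑u < 0 ∨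
        (↑image.length : ℤ) ≤ (i : ℤ) + ↑(kernel.length / 2) - ↑u)
    · rw [if_pos hq]
      trans (List.foldl (fun (s : ℤ) (_ : ℕ) => s) s (List.range ((kernel.headD []).length)))
      · rw [foldl_self]
      · apply foldl_ext'
        intro a v hv
        rw [List.mem_range] at hv
        rw [pad_getD, if_neg (by rw [List.length_map]; omega)]
        simp
    · rw [if_neg hq]
      apply foldl_ext'
      intro a v hv
      rw [List.mem_range] at hv
      have hlt : i + kernel.length - 1 - u - (kernel.length - 1 - kernel.length / 2)
          < image.length := by omega
      have hmem : image.getD (i + kernel.length - 1 - u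
          - (kernel.length - 1 - kernel.length / 2)) [] ∈ image := by
        rw [List.getD_eq_getElem?_getD, List.getElem?_eq_getElem hlt]
        exact List.getElem_mem _
      have hlen := hrect _ hmem
      have hrow : (List.take ((image.headD []).length) (image.getD (i + kernel.length - 1 - u
          - (kernel.length - 1 - kernel.length / 2)) [])).length
          = (image.headD []).length := by
        rw [List.length_take]
        omega
      by_cases hp : ((j : ℤ) + ↑((kernel.headD []).length / 2) - ↑v < 0 ∨
          (↑(image.headD []).length : ℤ) ≤ (j : ℤ) + ↑((kernel.headD []).length / 2) - ↑v)
      · rw [if_pos hp, pad_getD, if_pos (by rw [List.length_map]; exact ⟨by omega, hlt⟩),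
          getD_map_row _ _ _ hlt, padRow_getD, if_neg (by omega)]
        simp
      · rw [if_neg hp, pad_getD, if_pos (by rw [List.length_map]; exact ⟨by omega, hlt⟩),
          getD_map_row _ _ _ hlt, padRow_getD, if_pos ⟨by omega, by omega⟩]
        have e1 : i + kernel.length - 1 - u - (kernel.length - 1 - kernel.length / 2)
            = ((i : ℤ) + ↑(kernel.length / 2) - ↑u).toNat := by omega
        have e2 : j + (kernel.headD []).length - 1 - v
            - ((kernel.headD []).length - 1 - (kernel.headD []).length / 2)
            = ((j : ℤ) + ↑((kernel.headD []).length / 2) - ↑v).toNat := by omega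
        have e3 : (List.take ((image.headD []).length)
            (image.getD (i + kernel.length - 1 - u
              - (kernel.length - 1 - kernel.length / 2)) [])).getD
            (j + (kernel.headD []).length - 1 - v
              - ((kernel.headD []).length - 1 - (kernel.headD []).length / 2)) 0
            = (image.getD (i + kernel.length - 1 - u
              - (kernel.length - 1 - kernel.length / 2)) []).getD
            (j + (kernel.headD []).length - 1 - v
              - ((kernel.headD []).length - 1 - (kernel.headD []).length / 2)) 0 := by
          rw [List.getD_eq_getElem?_getD, List.getD_eq_getElem?_getD,
            List.getElem?_take_of_lt (by omega), ← List.getD_eq_getElem?_getD,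
            ← List.getD_eq_getElem?_getD]
        rw [e3, e1, e2]
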